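-- pv_equiv track=rewrite | github.com/DehsYkale/RP3_pub | MO_RawData_v05.py | set_buyer_type
-- ===== SOURCE A (Python) =====
-- def set_buyer_type(cat, baa, URL, DTE, LTY):
-- 	if baa == 'Homebuilder':
-- 		return 'HOME BUILDER'
-- 	elif baa == 'Inv/Dev':
-- 		return 'INVESTOR'
-- 	elif baa == 'Lot Banker':
-- 		return 'LAND BANK'
-- 	elif baa == 'User':
-- 		return 'USER'
-- 	elif any('Agricultural' in s for s in cat):
-- 		return 'AGRICULTURE'
-- 	elif any('Attorney' in s for s in cat):
-- 		return 'OTHER'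
-- 	elif any('uilder' in s for s in cat):	# Homebuliders and Builders thus 'uilder'
-- 		return 'HOME BUILDER'
-- 	elif any('Commercial' in s for s in cat):
-- 		return 'COMMERCIAL'
-- 	elif any('Dairy' in s for s in cat):
-- 		return 'AGRICULTURE'
-- 	elif any('Developer' in s for s in cat):
-- 		return 'COMMERCIAL'
-- 	elif any('Hotel' in s for s in cat):
-- 		return 'COMMERCIAL'
-- 	elif any('Industrial' in s for s in cat):
-- 		return 'COMMERCIAL'
-- 	elif any('Multifamily' in s for s in cat):
-- 		return 'APARTMENT'
-- 	elif any('Apartment' in s for s in cat):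
-- 		return 'APARTMENT'
-- 	elif any('Non-Profit' in s for s in cat):
-- 		return 'OTHER'
-- 	elif any('Office' in s for s in cat):
-- 		return 'COMMERCIAL'
-- 	elif any('Other' in s for s in cat):
-- 		return 'OTHER'
-- 	elif any('Person' in s for s in cat):
-- 		return 'INVESTOR'
-- 	elif any('Retail' in s for s in cat):
-- 		return 'COMMERCIAL'
-- 	elif any('Government' in s for s in cat):
-- 		return 'OTHER'
-- 	elif any('Lot Investor' in s for s in cat):
-- 		return 'LAND BANK'
-- 	elif any('Land Banker' in s for s in cat):
-- 		return 'LAND BANK'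
-- 	elif any('Investor' in s for s in cat):
-- 		return 'INVESTOR'
-- 	elif any('Lender' in s for s in cat):
-- 		return 'BANKS'
-- 	elif any('Medical' in s for s in cat):
-- 		return 'OTHER'
-- 	elif any('Retail' in s for s in cat):
-- 		return 'COMMERCIAL'
-- 	elif any('Schools' in s for s in cat):
-- 		return 'OTHER'
-- 	elif any('Utility' in s for s in cat):
-- 		return 'OTHER'
-- 	else:
-- 		# missingField('CATEGORY', URL, DTE, LTY)
-- 		return ''
-- ===== SOURCE B (Python) =====
-- _BAA = {
--     'Homebuilder': 'HOME BUILDER',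
--     'Inv/Dev': 'INVESTOR',
--     'Lot Banker': 'LAND BANK',
--     'User': 'USER',
-- }
--
-- # priority table: elif order of the original classifier
-- _TABLE = [
--     ('Agricultural', 'AGRICULTURE'),
--     ('Attorney', 'OTHER'),
--     ('uilder', 'HOME BUILDER'),   # Homebuilders and Builders
--     ('Commercial', 'COMMERCIAL'),
--     ('Dairy', 'AGRICULTURE'),
--     ('Developer', 'COMMERCIAL'),
--     ('Hotel', 'COMMERCIAL'),
--     ('Industrial', 'COMMERCIAL'),
--     ('Multifamily', 'APARTMENT'),
--     ('Apartment', 'APARTMENT'),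
--     ('Non-Profit', 'OTHER'),
--     ('Office', 'COMMERCIAL'),
--     ('Other', 'OTHER'),
--     ('Person', 'INVESTOR'),
--     ('Retail', 'COMMERCIAL'),
--     ('Government', 'OTHER'),
--     ('Lot Investor', 'LAND BANK'),
--     ('Land Banker', 'LAND BANK'),
--     ('Investor', 'INVESTOR'),
--     ('Lender', 'BANKS'),
--     ('Medical', 'OTHER'),
--     ('Retail', 'COMMERCIAL'),
--     ('Schools', 'OTHER'),
--     ('Utility', 'OTHER'),
-- ]
--
--
-- def set_buyer_type(cat, baa, URL, DTE, LTY):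
--     if baa in _BAA:
--         return _BAA[baa]
--     best = None
--     for s in cat:
--         for i, (kw, _c) in enumerate(_TABLE):
--             if kw in s:
--                 if best is None or i < best:
--                     best = i
--                 break
--     return _TABLE[best][1] if best is not None else ''
-- ===== Notes on version B (the rewrite author's own statement) =====
-- stated objective: alternative
-- what changed: Replaces the 28-branch elif chain of any()-scans over cat (keyword-outer, cat-inner) with a data-driven ordered priority table plus a dict for the exact baa matches: a single pass over cat computes, per element, the first matching table index and keeps the global minimum, which is then mapped to its category.
import Mathlib
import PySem

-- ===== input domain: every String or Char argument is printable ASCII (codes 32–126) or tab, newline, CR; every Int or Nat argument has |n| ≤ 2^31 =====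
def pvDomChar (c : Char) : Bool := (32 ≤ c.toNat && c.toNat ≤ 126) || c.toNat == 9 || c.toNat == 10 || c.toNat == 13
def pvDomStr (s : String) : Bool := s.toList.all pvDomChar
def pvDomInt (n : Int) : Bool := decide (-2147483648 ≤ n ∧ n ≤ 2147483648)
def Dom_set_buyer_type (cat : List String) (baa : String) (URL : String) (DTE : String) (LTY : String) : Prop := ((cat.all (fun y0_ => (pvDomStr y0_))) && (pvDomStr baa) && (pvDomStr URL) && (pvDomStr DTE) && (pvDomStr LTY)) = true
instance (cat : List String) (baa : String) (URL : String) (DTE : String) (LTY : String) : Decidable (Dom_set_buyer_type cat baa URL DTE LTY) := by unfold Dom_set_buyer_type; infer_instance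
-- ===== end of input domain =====

-- B replaces A's 28-branch elif chain of any()-scans with an ordered priority table + baa dict,
-- scanning cat once and tracking the minimal matching table index (objective: alternative).


-- ===== PORT A =====
def set_buyer_type (cat : List String) (baa : String) (URL : String) (DTE : String) (LTY : String) : String :=
  if baa = "Homebuilder" then "HOME BUILDER"
  else if baa = "Inv/Dev" then "INVESTOR"
  else if baa = "Lot Banker" then "LAND BANK"
  else if baa = "User" then "USER"
  else if cat.any (fun s => PySem.Str.isIn "Agricultural" s) then "AGRICULTURE"
  else if cat.any (fun s => PySem.Str.isIn "Attorney" s) then "OTHER"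
  else if cat.any (fun s => PySem.Str.isIn "uilder" s) then "HOME BUILDER"
  else if cat.any (fun s => PySem.Str.isIn "Commercial" s) then "COMMERCIAL"
  else if cat.any (fun s => PySem.Str.isIn "Dairy" s) then "AGRICULTURE"
  else if cat.any (fun s => PySem.Str.isIn "Developer" s) then "COMMERCIAL"
  else if cat.any (fun s => PySem.Str.isIn "Hotel" s) then "COMMERCIAL"
  else if cat.any (fun s => PySem.Str.isIn "Industrial" s) then "COMMERCIAL"
  else if cat.any (fun s => PySem.Str.isIn "Multifamily" s) then "APARTMENT"
  else if cat.any (fun s => PySem.Str.isIn "Apartment" s) then "APARTMENT"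
  else if cat.any (fun s => PySem.Str.isIn "Non-Profit" s) then "OTHER"
  else if cat.any (fun s => PySem.Str.isIn "Office" s) then "COMMERCIAL"
  else if cat.any (fun s => PySem.Str.isIn "Other" s) then "OTHER"
  else if cat.any (fun s => PySem.Str.isIn "Person" s) then "INVESTOR"
  else if cat.any (fun s => PySem.Str.isIn "Retail" s) then "COMMERCIAL"
  else if cat.any (fun s => PySem.Str.isIn "Government" s) then "OTHER"
  else if cat.any (fun s => PySem.Str.isIn "Lot Investor" s) then "LAND BANK"
  else if cat.any (fun s => PySem.Str.isIn "Land Banker" s) then "LAND BANK"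
  else if cat.any (fun s => PySem.Str.isIn "Investor" s) then "INVESTOR"
  else if cat.any (fun s => PySem.Str.isIn "Lender" s) then "BANKS"
  else if cat.any (fun s => PySem.Str.isIn "Medical" s) then "OTHER"
  else if cat.any (fun s => PySem.Str.isIn "Retail" s) then "COMMERCIAL"
  else if cat.any (fun s => PySem.Str.isIn "Schools" s) then "OTHER"
  else if cat.any (fun s => PySem.Str.isIn "Utility" s) then "OTHER"
  else ""

-- ===== PORT B =====
def pvBaaDict : PySem.Dict String String := PySem.Dict.mk
  [("Homebuilder", "HOME BUILDER"), ("Inv/Dev", "INVESTOR"),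
   ("Lot Banker", "LAND BANK"), ("User", "USER")]

def pvTable : List (String × String) :=
  [("Agricultural", "AGRICULTURE"), ("Attorney", "OTHER"), ("uilder", "HOME BUILDER"),
   ("Commercial", "COMMERCIAL"), ("Dairy", "AGRICULTURE"), ("Developer", "COMMERCIAL"),
   ("Hotel", "COMMERCIAL"), ("Industrial", "COMMERCIAL"), ("Multifamily", "APARTMENT"),
   ("Apartment", "APARTMENT"), ("Non-Profit", "OTHER"), ("Office", "COMMERCIAL"),
   ("Other", "OTHER"), ("Person", "INVESTOR"), ("Retail", "COMMERCIAL"),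
   ("Government", "OTHER"), ("Lot Investor", "LAND BANK"), ("Land Banker", "LAND BANK"),
   ("Investor", "INVESTOR"), ("Lender", "BANKS"), ("Medical", "OTHER"),
   ("Retail", "COMMERCIAL"), ("Schools", "OTHER"), ("Utility", "OTHER")]

-- 'best = i if best is None or i < best'
def pvOptMin : Option Nat → Option Nat → Option Nat
  | none, b => b
  | some a, none => some a
  | some a, some b => some (min a b)

def set_buyer_type_alt (cat : List String) (baa : String) (URL : String) (DTE : String) (LTY : String) : String :=
  match pvBaaDict.get? baa with
  | some v => v
  | none =>
    match cat.foldl (fun acc s => pvOptMin acc (pvTable.findIdx? (fun p => PySem.Str.isIn p.1 s))) none with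
    | some i => ((pvTable[i]?).map Prod.snd).getD ""
    | none => ""

-- ===== PRECONDITION & SPEC =====
def Spec_set_buyer_type (cat : List String) (baa : String) (URL : String) (DTE : String) (LTY : String) (out : String) : Prop := out = set_buyer_type_alt cat baa URL DTE LTY
instance (cat : List String) (baa : String) (URL : String) (DTE : String) (LTY : String) (out : String) : Decidable (Spec_set_buyer_type cat baa URL DTE LTY out) := by unfold Spec_set_buyer_type; infer_instance

-- ===== CLAIM (what is proved, stated in full; the proofs are below) =====
def Claim_equal_set_buyer_type : Prop := ∀ (cat : List String) (baa : String) (URL : String) (DTE : String) (LTY : String), Dom_set_buyer_type cat baa URL DTE LTY → Spec_set_buyer_type cat baa URL DTE LTY (set_buyer_type cat baa URL DTE LTY)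

-- ===== LEMMAS AND PROOFS =====

-- A's elif chain over a generic table (proof-only abstraction of A's else-part)
def pvChain : List (String × String) → List String → String
  | [], _ => ""
  | p :: t, cat => if cat.any (fun s => PySem.Str.isIn p.1 s) then p.2 else pvChain t cat

theorem pvOptMin_zero_left (y : Option Nat) : pvOptMin (some 0) y = some 0 := by
  cases y <;> simp [pvOptMin]

theorem pvOptMin_zero_right (y : Option Nat) : pvOptMin y (some 0) = some 0 := by
  cases y <;> simp [pvOptMin]

theorem pvOptMin_map_succ (x y : Option Nat) :
    pvOptMin (x.map (· + 1)) (y.map (· + 1)) = (pvOptMin x y).map (· + 1) := by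
  cases x <;> cases y <;> simp [pvOptMin]

theorem pvOptMin_assoc (a b c : Option Nat) :
    pvOptMin (pvOptMin a b) c = pvOptMin a (pvOptMin b c) := by
  cases a <;> cases b <;> cases c <;> simp [pvOptMin, Nat.min_assoc]

theorem pvFindIdx?_or (s : String) (cat : List String) (t : List (String × String)) :
    t.findIdx? (fun p => PySem.Str.isIn p.1 s || cat.any (fun s => PySem.Str.isIn p.1 s))
      = pvOptMin (t.findIdx? (fun p => PySem.Str.isIn p.1 s))
          (t.findIdx? (fun p => cat.any (fun s => PySem.Str.isIn p.1 s))) := by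
  induction t with
  | nil => rfl
  | cons x t ih =>
    rw [List.findIdx?_cons, List.findIdx?_cons, List.findIdx?_cons]
    cases ha : PySem.Str.isIn x.1 s <;>
      cases hb : cat.any (fun s => PySem.Str.isIn x.1 s) <;>
        simp only [Bool.false_or, Bool.true_or, Bool.or_true, if_true, if_false,
          Bool.false_eq_true, ih, pvOptMin_zero_left,
          pvOptMin_zero_right, pvOptMin_map_succ]

theorem pvFoldl_min (t : List (String × String)) (cat : List String) (acc : Option Nat) :
    cat.foldl (fun acc s => pvOptMin acc (t.findIdx? (fun p => PySem.Str.isIn p.1 s))) acc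
      = pvOptMin acc (t.findIdx? (fun p => cat.any (fun s => PySem.Str.isIn p.1 s))) := by
  induction cat generalizing acc with
  | nil =>
    rw [List.foldl_nil, List.findIdx?_eq_none_iff.2 (by intro x _; rfl)]
    cases acc <;> rfl
  | cons s cat ih =>
    rw [List.foldl_cons, ih,
      show (fun p : String × String => (s :: cat).any (fun s => PySem.Str.isIn p.1 s))
        = (fun p : String × String =>
            PySem.Str.isIn p.1 s || cat.any (fun s => PySem.Str.isIn p.1 s)) from by
          funext p; rw [List.any_cons],
      pvFindIdx?_or, ← pvOptMin_assoc]

theorem pvChain_eq (t : List (String × String)) (cat : List String) :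
    (match t.findIdx? (fun p => cat.any (fun s => PySem.Str.isIn p.1 s)) with
      | some i => ((t[i]?).map Prod.snd).getD ""
      | none => "") = pvChain t cat := by
  induction t with
  | nil => rfl
  | cons p t ih =>
    rw [List.findIdx?_cons]
    by_cases h : (cat.any fun s => PySem.Str.isIn p.1 s) = true
    · rw [if_pos h]
      show p.2 = pvChain (p :: t) cat
      simp only [pvChain]
      rw [if_pos h]
    · rw [if_neg h]
      simp only [pvChain, if_neg h]
      rw [← ih]
      cases t.findIdx? (fun p => cat.any fun s => PySem.Str.isIn p.1 s) <;> simp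

theorem pv_a_eq (cat : List String) (baa URL DTE LTY : String)
    (h1 : ¬ baa = "Homebuilder") (h2 : ¬ baa = "Inv/Dev")
    (h3 : ¬ baa = "Lot Banker") (h4 : ¬ baa = "User") :
    set_buyer_type cat baa URL DTE LTY = pvChain pvTable cat := by
  unfold set_buyer_type
  rw [if_neg h1, if_neg h2, if_neg h3, if_neg h4]
  rfl

theorem pv_alt_eq (cat : List String) (baa URL DTE LTY : String)
    (hd : pvBaaDict.get? baa = none) :
    set_buyer_type_alt cat baa URL DTE LTY = pvChain pvTable cat := by
  unfold set_buyer_type_alt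
  rw [hd, pvFoldl_min]
  exact pvChain_eq pvTable cat

-- ===== VERDICT (by name: the statement is the Claim_ definition above) =====
theorem set_buyer_type_spec : Claim_equal_set_buyer_type := by
  intro cat baa URL DTE LTY _
  unfold Spec_set_buyer_type
  by_cases h1 : baa = "Homebuilder"
  · subst h1
    simp [set_buyer_type, set_buyer_type_alt, pvBaaDict, PySem.Dict.get?_mk_cons]
  by_cases h2 : baa = "Inv/Dev"
  · subst h2
    simp [set_buyer_type, set_buyer_type_alt, pvBaaDict, PySem.Dict.get?_mk_cons]
  by_cases h3 : baa = "Lot Banker"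
  · subst h3
    simp [set_buyer_type, set_buyer_type_alt, pvBaaDict, PySem.Dict.get?_mk_cons]
  by_cases h4 : baa = "User"
  · subst h4
    simp [set_buyer_type, set_buyer_type_alt, pvBaaDict, PySem.Dict.get?_mk_cons]
  have hd : pvBaaDict.get? baa = none := by
    unfold pvBaaDict
    simp only [PySem.Dict.get?_mk_cons, beq_iff_eq]
    rw [if_neg (fun e => h1 e.symm), if_neg (fun e => h2 e.symm),
      if_neg (fun e => h3 e.symm), if_neg (fun e => h4 e.symm)]
    simp [PySem.Dict.get?]
  rw [pv_a_eq cat baa URL DTE LTY h1 h2 h3 h4, pv_alt_eq cat baa URL DTE LTY hd]
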